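-- pv_equiv track=rewrite | github.com/smetam/leetcode | problems/1385_find_the_distance_value_between_two_arrays/find_the_distance_value_between_two_arrays.py | is_within_distance
-- ===== SOURCE A (Python) =====
-- from typing import List
--
-- def is_within_distance(target: int, arr: List[int], d: int) -> bool:
--     left, right = 0, len(arr) - 1
--     while left <= right:
--         mid = (left + right) // 2
--         num = arr[mid]
--         if target - d <= num <= target + d:
--             return True
--         if target < num:
--             right = mid - 1
--         else:
--             left = mid + 1
--     return False
-- ===== SOURCE B (Python) =====
-- def is_within_distance(target: int, arr, d: int) -> bool:
--     # Same midpoint path as the index-based loop, but decomposed as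
--     # recursion on sublists: the midpoint of arr[l:r+1] is its element
--     # (len-1)//2, and the two halves are slices.
--     def go(sub):
--         if not sub:
--             return False
--         m = (len(sub) - 1) // 2
--         num = sub[m]
--         if target - d <= num <= target + d:
--             return True
--         if target < num:
--             return go(sub[:m])
--         return go(sub[m + 1:])
--     return go(arr)
-- ===== Notes on version B (the rewrite author's own statement) =====
-- stated objective: alternative
-- what changed: The index-managed while loop (left/right pointers into the whole array) is replaced by structural recursion on sublists: the helper takes the current subarray, probes its own midpoint (len-1)//2, and recurses on the slice before or after it, visiting exactly the same elements in the same order.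
import Mathlib
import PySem

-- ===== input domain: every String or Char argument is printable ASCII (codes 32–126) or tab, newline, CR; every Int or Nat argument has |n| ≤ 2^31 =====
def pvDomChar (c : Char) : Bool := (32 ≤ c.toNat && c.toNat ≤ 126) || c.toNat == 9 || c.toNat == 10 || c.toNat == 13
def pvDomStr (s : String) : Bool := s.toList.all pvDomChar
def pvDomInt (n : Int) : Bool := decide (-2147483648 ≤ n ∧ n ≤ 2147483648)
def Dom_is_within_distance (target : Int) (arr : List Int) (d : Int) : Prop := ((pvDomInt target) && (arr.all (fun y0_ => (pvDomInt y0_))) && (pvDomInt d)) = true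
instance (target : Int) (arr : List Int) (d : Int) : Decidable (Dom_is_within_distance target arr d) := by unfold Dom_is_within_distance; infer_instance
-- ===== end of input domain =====

-- B replaces the index-managed while loop by structural recursion on sublists (same probe sequence); alternative decomposition, no speed claim.


-- ===== PORT A =====
-- the while loop of A; `none` from pyGet? (IndexError) cannot occur from the initial call
def iswdLoop (target d : Int) (arr : List Int) (left right : Int) : Bool :=
  if h : left ≤ right then
    let mid := PySem.Int.floordiv (left + right) 2
    match PySem.List.pyGet? arr mid with
    | none => false
    | some num =>
      if target - d ≤ num ∧ num ≤ target + d then true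
      else if target < num then iswdLoop target d arr left (mid - 1)
      else iswdLoop target d arr (mid + 1) right
  else false
termination_by (right + 1 - left).toNat
decreasing_by
  · have := PySem.Int.floordiv_two_mid_bounds h; omega
  · have := PySem.Int.floordiv_two_mid_bounds h; omega

def is_within_distance (target : Int) (arr : List Int) (d : Int) : Bool :=
  iswdLoop target d arr 0 ((arr.length : Int) - 1)

-- ===== PORT B =====
-- Source B's go(sub): sub[m] with 0 ≤ m < len(sub) is getD m 0; sub[:m] is take m, sub[m+1:] is drop (m+1) (exact: bounds are in range and nonnegative)
def iswdGo (target d : Int) (sub : List Int) : Bool :=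
  if h : sub = [] then false
  else
    let m := (sub.length - 1) / 2
    let num := sub.getD m 0
    if target - d ≤ num ∧ num ≤ target + d then true
    else if target < num then iswdGo target d (sub.take m)
    else iswdGo target d (sub.drop (m + 1))
termination_by sub.length
decreasing_by
  · have : sub.length ≠ 0 := fun h0 => h (List.eq_nil_of_length_eq_zero h0)
    simp [List.length_take]; omega
  · have : sub.length ≠ 0 := fun h0 => h (List.eq_nil_of_length_eq_zero h0)
    simp; omega

def is_within_distance_alt (target : Int) (arr : List Int) (d : Int) : Bool :=
  iswdGo target d arr

-- ===== PRECONDITION & SPEC =====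
def Spec_is_within_distance (target : Int) (arr : List Int) (d : Int) (out : Bool) : Prop := out = is_within_distance_alt target arr d
instance (target : Int) (arr : List Int) (d : Int) (out : Bool) : Decidable (Spec_is_within_distance target arr d out) := by unfold Spec_is_within_distance; infer_instance

-- ===== CLAIM (what is proved, stated in full; the proofs are below) =====
def Claim_equal_is_within_distance : Prop := ∀ (target : Int) (arr : List Int) (d : Int), Dom_is_within_distance target arr d → Spec_is_within_distance target arr d (is_within_distance target arr d)

-- ===== LEMMAS AND PROOFS =====

-- the loop on [left, right] computes what go computes on the sublist arr[left : right+1]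
lemma loop_eq_go (target d : Int) (arr : List Int) :
    ∀ n (left right : Int), (right + 1 - left).toNat = n → 0 ≤ left → right < (arr.length : Int) →
      iswdLoop target d arr left right = iswdGo target d ((arr.drop left.toNat).take n) := by
  intro n
  induction n using Nat.strong_induction_on with
  | _ n IH =>
    intro left right hn hl hr
    by_cases hlr : left ≤ right
    · obtain ⟨k, rfl⟩ : ∃ k : Nat, right = left + k := ⟨(right - left).toNat, by omega⟩
      have hn' : n = k + 1 := by omega
      subst hn'
      set l := left.toNat with hldef
      have harr : l + k < arr.length := by omega
      have hlen : ((arr.drop l).take (k + 1)).length = k + 1 := by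
        simp [List.length_take, List.length_drop]; omega
      have hne : (arr.drop l).take (k + 1) ≠ [] := by
        intro h0; rw [h0] at hlen; simp at hlen
      have hmid : PySem.Int.floordiv (left + (left + (k : Int))) 2 = left + ((k / 2 : Nat) : Int) := by
        rw [PySem.Int.floordiv_eq_iff_of_pos (by norm_num)]
        constructor <;> push_cast <;> omega
      have hidx : l + k / 2 < arr.length := by omega
      have htn : (left + ((k / 2 : Nat) : Int)).toNat = l + k / 2 := by omega
      have hnumA : PySem.List.pyGet? arr (left + ((k / 2 : Nat) : Int)) = some (arr[l + k / 2]'hidx) := by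
        rw [PySem.List.pyGet?_of_nonneg arr (by omega), htn]
        exact List.getElem?_eq_getElem hidx
      have hmB : ((arr.drop l).take (k + 1)).length - 1 = k := by omega
      have hnumB : ((arr.drop l).take (k + 1)).getD (k / 2) 0 = arr[l + k / 2]'hidx := by
        rw [List.getD_eq_getElem _ _ (by rw [hlen]; omega)]
        rw [List.getElem_take, List.getElem_drop]
      rw [iswdLoop, iswdGo]
      simp only [dif_pos hlr, dif_neg hne, hmid, hnumA, hlen, Nat.add_sub_cancel, hnumB]
      by_cases hin : target - d ≤ arr[l + k / 2]'hidx ∧ arr[l + k / 2]'hidx ≤ target + d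
      · rw [if_pos hin, if_pos hin]
      · rw [if_neg hin, if_neg hin]
        by_cases hlt : target < arr[l + k / 2]'hidx
        · rw [if_pos hlt, if_pos hlt]
          have hrec := IH (k / 2) (by omega) left (left + ((k / 2 : Nat) : Int) - 1)
            (by omega) hl (by omega)
          rw [hrec, ← hldef, List.take_take]
          have hmin : min (k / 2) (k + 1) = k / 2 := by omega
          rw [hmin]
        · rw [if_neg hlt, if_neg hlt]
          have hrec := IH (k - k / 2) (by omega) (left + ((k / 2 : Nat) : Int) + 1) (left + (k : Int))
            (by omega) (by omega) (by omega)
          rw [hrec, List.drop_take]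
          have h1 : (left + ((k / 2 : Nat) : Int) + 1).toNat = k / 2 + 1 + l := by omega
          have h2 : k + 1 - (k / 2 + 1) = k - k / 2 := by omega
          rw [h1, ← List.drop_drop, h2, List.drop_drop, List.drop_drop, Nat.add_comm]
    · have hn0 : n = 0 := by omega
      rw [iswdLoop, iswdGo]
      simp [hlr, hn0]

theorem is_within_distance_spec : Claim_equal_is_within_distance := by
  intro target arr d _
  unfold Spec_is_within_distance is_within_distance is_within_distance_alt
  have h := loop_eq_go target d arr ((arr.length : Int) + 1 - 1 - 0).toNat 0 ((arr.length : Int) - 1)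
    (by omega) (by omega) (by omega)
  simpa using h
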